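-- pv_equiv track=rewrite | github.com/Matthias-Rev/RO_project_grp2 | compacity.py | Partitionning
-- ===== SOURCE A (Python) =====
-- def Partitionning(listObj):
--     AHSortList = []
--
--     minelem = min(listObj, key=returnLine)
--     for elem in listObj:
--         if returnLine(elem) == returnLine(minelem) and returnCol(elem) < returnCol(minelem):
--             minelem = elem
--
--     for elem in listObj:
--         if returnCol(elem) > returnCol(minelem):
--             AHSortList.append(elem)
--
--     return AHSortList
--
-- def returnCol(objet):
--     col = objet[0]
--     return col
--
-- def returnLine(objet):
--     line = objet[1]
--     return line
-- ===== SOURCE B (Python) =====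
-- def Partitionning(listObj):
--     byPos = sorted(listObj, key=lambda o: (o[1], o[0]))
--     ref = byPos[0]
--     return [e for e in listObj if e[0] > ref[0]]
-- ===== Notes on version B (the rewrite author's own statement) =====
-- stated objective: alternative
-- what changed: The reference point is obtained by sorting the list with a (line, col) key and taking the first element of the sorted order, instead of A's running-min-by-line scan followed by a corrective tie-break scan; the result is then a single filter comprehension.
import Mathlib
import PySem

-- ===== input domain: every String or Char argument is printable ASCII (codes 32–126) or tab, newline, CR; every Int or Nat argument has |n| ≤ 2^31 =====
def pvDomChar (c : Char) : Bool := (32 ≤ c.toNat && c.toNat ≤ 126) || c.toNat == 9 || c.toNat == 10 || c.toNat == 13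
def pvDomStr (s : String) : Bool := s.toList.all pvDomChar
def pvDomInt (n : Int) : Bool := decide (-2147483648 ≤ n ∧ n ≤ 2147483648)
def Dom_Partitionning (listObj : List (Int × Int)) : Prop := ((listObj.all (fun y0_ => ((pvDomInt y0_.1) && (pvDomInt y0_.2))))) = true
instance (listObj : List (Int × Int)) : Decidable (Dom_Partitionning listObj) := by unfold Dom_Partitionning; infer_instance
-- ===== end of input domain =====

-- B finds the reference point by SORTING the list with a (line, col) key and taking
-- the first element, instead of A's running-min-by-line scan plus corrective
-- tie-break scan; the output is a single filter (alternative algorithm, not faster).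
-- Points are (col, line): returnCol = .1, returnLine = .2.

-- ===== PORT A =====
def Partitionning (listObj : List (Int × Int)) : List (Int × Int) :=
  match PySem.List.min? listObj (fun o => o.2) with
  | none => []   -- unreachable under Pre_: min([]) raises ValueError
  | some m0 =>
    let minelem := listObj.foldl
      (fun minelem elem =>
        if elem.2 = minelem.2 ∧ elem.1 < minelem.1 then elem else minelem) m0
    listObj.foldl (fun acc elem => if elem.1 > minelem.1 then acc ++ [elem] else acc) []

-- ===== PORT B =====
def Partitionning_alt (listObj : List (Int × Int)) : List (Int × Int) :=
  let byPos := PySem.List.sorted2 listObj (fun o => o.2) (fun o => o.1)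
  match byPos.head? with
  | none => []   -- unreachable under Pre_: byPos[0] raises IndexError
  | some ref => listObj.filter (fun e => decide (e.1 > ref.1))

-- ===== PRECONDITION & SPEC =====
-- Pre_ excludes only the empty list, on which A raises ValueError (min of empty) and B raises IndexError.
def Pre_Partitionning (listObj : List (Int × Int)) : Prop := listObj ≠ []
instance (listObj : List (Int × Int)) : Decidable (Pre_Partitionning listObj) := by unfold Pre_Partitionning; infer_instance
def pvWitness_Partitionning : (List (Int × Int)) := [(2, 1), (0, 1), (5, 3)]

def Spec_Partitionning (listObj : List (Int × Int)) (out : List (Int × Int)) : Prop := out = Partitionning_alt listObj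
instance (listObj : List (Int × Int)) (out : List (Int × Int)) : Decidable (Spec_Partitionning listObj out) := by unfold Spec_Partitionning; infer_instance

-- ===== CLAIM (what is proved, stated in full; the proofs are below) =====
def Claim_equal_Partitionning : Prop := ∀ (listObj : List (Int × Int)), Dom_Partitionning listObj → Pre_Partitionning listObj → Spec_Partitionning listObj (Partitionning listObj)

-- ===== LEMMAS AND PROOFS =====

-- strict lexicographic order on (col, line) pairs compared as (line, col)
def pvLexLt (a b : Int × Int) : Prop := a.2 < b.2 ∨ (a.2 = b.2 ∧ a.1 < b.1)

-- the Boolean lex comparator used by sorted2 with keys (.2, .1)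
def pvLtB (a b : Int × Int) : Bool :=
  decide (a.2 < b.2) || (!decide (b.2 < a.2) && decide (a.1 < b.1))

theorem pvLtB_iff (a b : Int × Int) : pvLtB a b = true ↔ pvLexLt a b := by
  simp only [pvLtB, pvLexLt, Bool.or_eq_true, decide_eq_true_eq, Bool.and_eq_true,
    Bool.not_eq_true', decide_eq_false_iff_not]
  omega

-- running-min step function of A's first pass
def pvHA (m e : Int × Int) : Int × Int := if e.2 < m.2 then e else m
-- A's corrective-scan step
def pvF (m e : Int × Int) : Int × Int := if e.2 = m.2 ∧ e.1 < m.1 then e else m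

-- a fold over Option that never leaves `some` is a fold over the value
theorem pvFoldl_some_eq {α : Type} (f : Option α → α → Option α) (g : α → α → α)
    (hf : ∀ m x, f (some m) x = some (g m x)) (t : List α) (m : α) :
    List.foldl f (some m) t = some (t.foldl g m) := by
  induction t generalizing m with
  | nil => rfl
  | cons x t ih => rw [List.foldl_cons, List.foldl_cons, hf]; exact ih (g m x)

theorem pvHA_lineMin (t : List (Int × Int)) (m : Int × Int) :
    (t.foldl pvHA m).2 ≤ m.2 ∧ ∀ y ∈ t, (t.foldl pvHA m).2 ≤ y.2 := by
  induction t generalizing m with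
  | nil => simp
  | cons x t ih =>
    rw [List.foldl_cons]
    have hstep : (pvHA m x).2 ≤ m.2 ∧ (pvHA m x).2 ≤ x.2 := by
      simp only [pvHA]; split <;> omega
    refine ⟨le_trans (ih (pvHA m x)).1 hstep.1, ?_⟩
    intro y hy
    rcases List.mem_cons.mp hy with h | h
    · rw [h]; exact le_trans (ih (pvHA m x)).1 hstep.2
    · exact (ih (pvHA m x)).2 y h

theorem pvHA_mem (t : List (Int × Int)) (m : Int × Int) :
    t.foldl pvHA m = m ∨ t.foldl pvHA m ∈ t := by
  induction t generalizing m with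
  | nil => simp
  | cons x t ih =>
    rw [List.foldl_cons]
    simp only [pvHA]
    split
    · rcases ih x with h | h
      · right; simp [h]
      · right; simp [h]
    · rcases ih m with h | h
      · left; exact h
      · right; simp [h]

-- A's corrective fold result: membership among seed and traversed elements
theorem pvF_mem (t : List (Int × Int)) (m : Int × Int) :
    t.foldl pvF m = m ∨ t.foldl pvF m ∈ t := by
  induction t generalizing m with
  | nil => simp
  | cons x t ih =>
    rw [List.foldl_cons]
    simp only [pvF]
    split
    · rcases ih x with h | h
      · right; simp [h]
      · right; simp [h]
    · rcases ih m with h | h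
      · left; exact h
      · right; simp [h]

-- A's corrective fold, started from a seed of minimal line among t ∪ {seed},
-- yields a lex-minimal element among the seed and the traversed elements.
theorem pvF_min (t : List (Int × Int)) (m : Int × Int)
    (h : ∀ y ∈ t, m.2 ≤ y.2) :
    ¬ pvLexLt m (t.foldl pvF m) ∧ ∀ y ∈ t, ¬ pvLexLt y (t.foldl pvF m) := by
  induction t generalizing m with
  | nil => simp [pvLexLt]
  | cons x t ih =>
    have hx : m.2 ≤ x.2 := h x (by simp)
    rw [List.foldl_cons]
    have hstep : ¬ pvLexLt m (pvF m x) ∧ ¬ pvLexLt x (pvF m x) ∧ (pvF m x).2 ≤ m.2 := by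
      simp only [pvF, pvLexLt]; split <;> rename_i hc <;> refine ⟨?_, ?_, ?_⟩ <;> omega
    have hrec := ih (pvF m x)
      (fun y hy => le_trans hstep.2.2 (h y (List.mem_cons_of_mem x hy)))
    refine ⟨?_, ?_⟩
    · have h1 := hrec.1; have h2 := hstep.1
      simp only [pvLexLt] at h1 h2 ⊢; omega
    · intro y hy
      rcases List.mem_cons.mp hy with hh | hh
      · rw [hh]
        have h1 := hrec.1; have h2 := hstep.2.1
        simp only [pvLexLt] at h1 h2 ⊢; omega
      · exact hrec.2 y hh

-- insertBy with pvLtB preserves "earlier is never lex-greater"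
theorem pvInsertBy_pairwise (x : Int × Int) (ys : List (Int × Int))
    (h : ys.Pairwise (fun a b => ¬ pvLexLt b a)) :
    (PySem.List.insertBy pvLtB x ys).Pairwise (fun a b => ¬ pvLexLt b a) := by
  induction ys with
  | nil => simp [PySem.List.insertBy, pvLexLt]
  | cons y ys ih =>
    rw [List.pairwise_cons] at h
    show (if pvLtB x y then x :: y :: ys else y :: PySem.List.insertBy pvLtB x ys).Pairwise _
    split <;> rename_i hc
    · have hxy : pvLexLt x y := (pvLtB_iff x y).mp hc
      refine List.pairwise_cons.mpr ⟨?_, List.pairwise_cons.mpr h⟩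
      intro z hz
      rcases List.mem_cons.mp hz with hh | hh
      · subst hh; simp only [pvLexLt] at hxy ⊢; omega
      · have hyz : ¬ pvLexLt z y := h.1 z hh
        simp only [pvLexLt] at hxy hyz ⊢; omega
    · have hxy : ¬ pvLexLt x y := fun hl => hc ((pvLtB_iff x y).mpr hl)
      refine List.pairwise_cons.mpr ⟨?_, ih h.2⟩
      intro z hz
      rcases (PySem.List.mem_insertBy pvLtB x z ys).mp hz with hh | hh
      · subst hh; exact hxy
      · exact h.1 z hh

theorem pvSorted2_pairwise (xs : List (Int × Int)) :
    (PySem.List.sorted2 xs (fun o => o.2) (fun o => o.1)).Pairwise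
      (fun a b => ¬ pvLexLt b a) := by
  have main : ∀ (l acc : List (Int × Int)), acc.Pairwise (fun a b => ¬ pvLexLt b a) →
      (l.foldl (fun acc x => PySem.List.insertBy pvLtB x acc) acc).Pairwise
        (fun a b => ¬ pvLexLt b a) := by
    intro l
    induction l with
    | nil => intro acc h; exact h
    | cons x l ih =>
      intro acc h
      rw [List.foldl_cons]
      exact ih _ (pvInsertBy_pairwise x acc h)
  exact main xs [] List.Pairwise.nil

theorem pvLex_antisymm (a b : Int × Int) (h1 : ¬ pvLexLt a b) (h2 : ¬ pvLexLt b a) : a = b := by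
  simp only [pvLexLt] at h1 h2
  have : a.1 = b.1 ∧ a.2 = b.2 := by omega
  exact Prod.ext this.1 this.2

-- the head of B's sorted list is a lex-minimal element of the list
theorem pvSortedHead_min (xs : List (Int × Int)) (m : Int × Int)
    (t : List (Int × Int))
    (h : PySem.List.sorted2 xs (fun o => o.2) (fun o => o.1) = m :: t) :
    m ∈ xs ∧ ∀ y ∈ xs, ¬ pvLexLt y m := by
  have hperm := PySem.List.sorted2_perm xs (fun o => o.2) (fun o => o.1) false
  rw [h] at hperm
  constructor
  · exact hperm.mem_iff.mp (by simp)
  · intro y hy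
    have hy' : y ∈ m :: t := hperm.mem_iff.mpr hy
    rcases List.mem_cons.mp hy' with hh | hh
    · subst hh; simp [pvLexLt]
    · have hp := pvSorted2_pairwise xs
      rw [h, List.pairwise_cons] at hp
      exact hp.1 y hh

-- A's append loop is the filter, for any accumulator prefix
theorem pvFoldl_append_filter (c : Int) (l : List (Int × Int)) (acc : List (Int × Int)) :
    l.foldl (fun acc elem => if elem.1 > c then acc ++ [elem] else acc) acc
      = acc ++ l.filter (fun e => decide (e.1 > c)) := by
  induction l generalizing acc with
  | nil => simp
  | cons e l ih =>
    rw [List.foldl_cons]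
    by_cases h : e.1 > c
    · rw [if_pos h, ih]; simp [h]
    · rw [if_neg h, ih]; simp [h]

-- ===== VERDICT (by name: the statement is the Claim_ definition above) =====
theorem Partitionning_spec : Claim_equal_Partitionning := by
  intro listObj _ hpre
  unfold Spec_Partitionning
  obtain ⟨x, t, rfl⟩ : ∃ x t, listObj = x :: t := by
    cases listObj with
    | nil => exact absurd rfl hpre
    | cons a b => exact ⟨a, b, rfl⟩
  -- A's reference element
  have hA : PySem.List.min? (x :: t) (fun o => o.2) = some (t.foldl pvHA x) := by
    unfold PySem.List.min?
    rw [List.foldl_cons]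
    refine pvFoldl_some_eq _ pvHA ?_ t x
    intro m y
    show (if y.2 < m.2 then some y else some m) = some (pvHA m y)
    simp only [pvHA]
    split <;> rfl
  set mA := (x :: t).foldl pvF (t.foldl pvHA x) with hmA
  -- B's reference element
  have hne : PySem.List.sorted2 (x :: t) (fun o => o.2) (fun o => o.1) ≠ [] := by
    intro hnil
    have := PySem.List.sorted2_perm (x :: t) (fun o => o.2) (fun o => o.1) false
    rw [hnil] at this
    exact absurd this.symm.length_eq (by simp)
  obtain ⟨mB, tB, hsort⟩ : ∃ m tb,
      PySem.List.sorted2 (x :: t) (fun o => o.2) (fun o => o.1) = m :: tb := by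
    cases hs : PySem.List.sorted2 (x :: t) (fun o => o.2) (fun o => o.1) with
    | nil => exact absurd hs hne
    | cons a b => exact ⟨a, b, rfl⟩
  -- both references are lex-minimal elements of the list, hence equal
  have hBmin := pvSortedHead_min (x :: t) mB tB hsort
  have hline : ∀ y ∈ x :: t, (t.foldl pvHA x).2 ≤ y.2 := by
    intro y hy
    rcases List.mem_cons.mp hy with h | h
    · rw [h]; exact (pvHA_lineMin t x).1
    · exact (pvHA_lineMin t x).2 y h
  have hAmin := pvF_min (x :: t) (t.foldl pvHA x) hline
  have hAmem : mA ∈ x :: t := by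
    rcases pvF_mem (x :: t) (t.foldl pvHA x) with h | h
    · rw [hmA, h]
      rcases pvHA_mem t x with h' | h'
      · rw [h']; simp
      · exact List.mem_cons_of_mem x h'
    · exact h
  have hAmin' : ∀ y ∈ x :: t, ¬ pvLexLt y mA := hAmin.2
  have href : mA = mB :=
    pvLex_antisymm mA mB (hBmin.2 mA hAmem) (hAmin' mB hBmin.1)
  -- assemble
  unfold Partitionning Partitionning_alt
  rw [hA, hsort]
  simp only [List.head?_cons]
  have hAfold : (x :: t).foldl
      (fun minelem elem =>
        if elem.2 = minelem.2 ∧ elem.1 < minelem.1 then elem else minelem)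
      (t.foldl pvHA x) = mA := by
    rw [hmA]; rfl
  rw [hAfold, href]
  exact pvFoldl_append_filter mB.1 (x :: t) []
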